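-- pv_equiv track=rewrite | github.com/BabylonJS/Extensions | QueuedInterpolation/Blender/src/tower-of-babel/package_level.py | findContigousRanges
-- ===== SOURCE A (Python) =====
-- MIN_CONTIGUOUS_INDEXES = 10
--
-- def findContigousRanges(array, isSorted):
--     ret = []
--     inRange = False
--     minNumber = 1 if isSorted else MIN_CONTIGUOUS_INDEXES # need at least 10 contiguous when not sorted
--
--     offset = beginVal = -1
--
--     #  loop from first to end - 1 (range is not inclusive)
--     for i in range(len(array) - 1):
--         if array[i] + 1 == array[i + 1]:
--             if not inRange:
--                 offset = i
--                 beginVal = array[i]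
--                 inRange = True
--
--         elif inRange:
--             if 1 + i - offset >=  minNumber:
--                 ret.append([offset, beginVal, array[i]])
--             inRange = False
--
--     # test to see if ran out of numbers while still in a range
--     if inRange:
--         ret.append([offset, beginVal, array[len(array) - 1]])
--
--     return ret
-- ===== SOURCE B (Python) =====
-- MIN_CONTIGUOUS_INDEXES = 10
--
-- def findContigousRanges(array, isSorted):
--     # Run-extraction rewrite: split the array into maximal runs of consecutive
--     # values (two-pointer scan over runs) instead of a per-element state flag.
--     minNumber = 1 if isSorted else MIN_CONTIGUOUS_INDEXES
--     ret = []
--     n = len(array)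
--     start = 0
--     while start < n:
--         end = start + 1
--         while end < n and array[end - 1] + 1 == array[end]:
--             end += 1
--         k = end - start
--         if k >= 2 and k >= minNumber:
--             ret.append([start, array[start], array[end - 1]])
--         start = end
--     return ret
-- ===== Notes on version B (the rewrite author's own statement) =====
-- stated objective: alternative
-- what changed: B splits the array into maximal consecutive runs with an explicit two-pointer run scan and emits each qualifying run directly, replacing A's per-element inRange/offset/beginVal state machine, and applies the minimum-length check uniformly to the trailing run.
-- intended difference: When isSorted is false and the array ends in a contiguous run of 2 to 9 consecutive values, A appends that trailing run to the result unconditionally (skipping its own MIN_CONTIGUOUS_INDEXES check, contradicting its comment 'need at least 10 contiguous when not sorted'), while B omits it by applying the minimum-length check uniformly, which is the intended behaviour. — e.g. on findContigousRanges([5, 6], false): A returns [[0, 5, 6]], B returns []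
import Mathlib
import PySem

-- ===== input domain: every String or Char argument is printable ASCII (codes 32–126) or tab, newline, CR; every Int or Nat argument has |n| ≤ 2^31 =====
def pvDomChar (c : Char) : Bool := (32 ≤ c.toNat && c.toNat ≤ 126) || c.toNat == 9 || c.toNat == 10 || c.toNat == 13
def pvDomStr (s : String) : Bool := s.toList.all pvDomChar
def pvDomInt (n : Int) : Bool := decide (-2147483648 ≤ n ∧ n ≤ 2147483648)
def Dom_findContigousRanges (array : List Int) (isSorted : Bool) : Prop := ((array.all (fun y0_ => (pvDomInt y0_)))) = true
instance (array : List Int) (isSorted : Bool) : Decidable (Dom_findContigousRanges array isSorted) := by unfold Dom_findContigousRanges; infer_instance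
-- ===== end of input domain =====

-- B replaces A's per-element inRange/offset/beginVal state machine by an explicit
-- split into maximal consecutive runs, and applies the minimum-length check
-- uniformly (A skips it for a run that reaches the end of the array).

-- ===== PORT A =====
-- state: (ret, inRange, offset, beginVal), exactly A's loop variables
def pvStepA (array : List Int) (minNumber : Int)
    (st : List (List Int) × Bool × Int × Int) (i : Nat) :
    List (List Int) × Bool × Int × Int :=
  let (ret, inRange, offset, beginVal) := st
  if array.getD i 0 + 1 = array.getD (i + 1) 0 then
    if !inRange then (ret, true, (i : Int), array.getD i 0) else st
  else if inRange then
    ((if minNumber ≤ 1 + (i : Int) - offset then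
        ret ++ [[offset, beginVal, array.getD i 0]] else ret),
     false, offset, beginVal)
  else st

def findContigousRanges (array : List Int) (isSorted : Bool) : List (List Int) :=
  let minNumber : Int := if isSorted then 1 else 10
  let s := (List.range (array.length - 1)).foldl (pvStepA array minNumber)
    ([], false, -1, -1)
  if s.2.1 then s.1 ++ [[s.2.2.1, s.2.2.2, array.getD (array.length - 1) 0]] else s.1

-- ===== PORT B =====
-- k = length of the maximal initial run of consecutive values (B's inner while)
def pvRunLen : List Int → Nat
  | [] => 0
  | [_] => 1
  | a :: b :: t => if a + 1 = b then pvRunLen (b :: t) + 1 else 1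

theorem pvRunLen_pos (x : Int) (t : List Int) : 1 ≤ pvRunLen (x :: t) := by
  cases t with
  | nil => simp [pvRunLen]
  | cons b s => simp only [pvRunLen]; split <;> omega

-- B's outer while loop as recursion on the remaining suffix
def pvAltGo (minNumber : Int) (pos : Int) : List Int → List (List Int)
  | [] => []
  | x :: t =>
    let k := pvRunLen (x :: t)
    (if 2 ≤ k ∧ minNumber ≤ (k : Int) then [[pos, x, (x :: t).getD (k - 1) 0]] else [])
      ++ pvAltGo minNumber (pos + (k : Int)) ((x :: t).drop k)
termination_by xs => xs.length
decreasing_by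
  have h1 := pvRunLen_pos x t
  have h2 : ((x :: t).drop (pvRunLen (x :: t))).length = (x :: t).length - pvRunLen (x :: t) :=
    List.length_drop
  simp only [List.length_cons] at *
  omega

def findContigousRanges_alt (array : List Int) (isSorted : Bool) : List (List Int) :=
  pvAltGo (if isSorted then 1 else 10) 0 array

-- ===== PRECONDITION & SPEC =====
-- When isSorted is false and the array ends in a contiguous run of 2..9 consecutive
-- values, A appends that trailing run unconditionally (skipping its own
-- MIN_CONTIGUOUS_INDEXES check, contradicting its comment), while B applies the
-- minimum-length check uniformly and omits it — the intended behaviour.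
def D_findContigousRanges (array : List Int) (isSorted : Bool) : Prop :=
  isSorted = false ∧
  (2 ≤ array.length ∧
    ∀ p ∈ (array.drop (array.length - 2)).zip (array.drop (array.length - 2)).tail,
      p.1 + 1 = p.2) ∧
  ¬ (10 ≤ array.length ∧
    ∀ p ∈ (array.drop (array.length - 10)).zip (array.drop (array.length - 10)).tail,
      p.1 + 1 = p.2)
instance (array : List Int) (isSorted : Bool) : Decidable (D_findContigousRanges array isSorted) := by
  unfold D_findContigousRanges; infer_instance

def Spec_findContigousRanges (array : List Int) (isSorted : Bool) (out : List (List Int)) : Prop :=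
  ¬ D_findContigousRanges array isSorted → out = findContigousRanges_alt array isSorted
instance (array : List Int) (isSorted : Bool) (out : List (List Int)) : Decidable (Spec_findContigousRanges array isSorted out) := by
  unfold Spec_findContigousRanges; infer_instance

def pvDiffWitness_findContigousRanges : List Int × Bool := ([5, 6], false)
def pvDiffWitnessOut_findContigousRanges : (List (List Int)) × (List (List Int)) :=
  ([[0, 5, 6]], [])

-- ===== CLAIM (what is proved, stated in full; the proofs are below) =====
def Claim_unchanged_findContigousRanges : Prop := ∀ (array : List Int) (isSorted : Bool), Dom_findContigousRanges array isSorted → Spec_findContigousRanges array isSorted (findContigousRanges array isSorted)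
def Claim_exact_findContigousRanges : Prop := ∀ (array : List Int) (isSorted : Bool), Dom_findContigousRanges array isSorted → D_findContigousRanges array isSorted → findContigousRanges array isSorted ≠ findContigousRanges_alt array isSorted
def Claim_changed_findContigousRanges : Prop := Dom_findContigousRanges (pvDiffWitness_findContigousRanges.1) (pvDiffWitness_findContigousRanges.2) ∧ D_findContigousRanges (pvDiffWitness_findContigousRanges.1) (pvDiffWitness_findContigousRanges.2) ∧ findContigousRanges (pvDiffWitness_findContigousRanges.1) (pvDiffWitness_findContigousRanges.2) = pvDiffWitnessOut_findContigousRanges.1 ∧ findContigousRanges_alt (pvDiffWitness_findContigousRanges.1) (pvDiffWitness_findContigousRanges.2) = pvDiffWitnessOut_findContigousRanges.2 ∧ pvDiffWitnessOut_findContigousRanges.1 ≠ pvDiffWitnessOut_findContigousRanges.2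

-- ===== LEMMAS AND PROOFS =====

-- length of the maximal trailing run of consecutive values (inspects the input only)
def pvTrail : List Int → Nat
  | [] => 0
  | [_] => 1
  | a :: b :: t =>
    if a + 1 = b ∧ pvTrail (b :: t) = t.length + 1 then pvTrail (b :: t) + 1
    else pvTrail (b :: t)


-- A's state machine as a recursion over the suffix of the array:
-- st = none ↔ inRange is false; st = some (offset, beginVal) ↔ inRange is true.
def pvMach (minN : Int) : Option (Int × Int) → Nat → List Int → List (List Int)
  | some (off, bv), _, [a] => [[off, bv, a]]
  | st, pos, a :: b :: t =>
    if a + 1 = b then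
      match st with
      | none => pvMach minN (some ((pos : Int), a)) (pos + 1) (b :: t)
      | some _ => pvMach minN st (pos + 1) (b :: t)
    else
      match st with
      | none => pvMach minN none (pos + 1) (b :: t)
      | some (off, bv) =>
        (if minN ≤ 1 + (pos : Int) - off then [[off, bv, a]] else []) ++
          pvMach minN none (pos + 1) (b :: t)
  | _, _, _ => []

theorem getElem?_of_drop (arr : List Int) (pos : Nat) (y : Int) (ys : List Int)
    (h : arr.drop pos = y :: ys) : arr[pos]? = some y := by
  have h1 : (arr.drop pos)[0]? = arr[pos + 0]? := List.getElem?_drop ..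
  simp [h] at h1; exact h1.symm

theorem drop_succ_of_drop (arr : List Int) (pos : Nat) (y : Int) (ys : List Int)
    (h : arr.drop pos = y :: ys) : arr.drop (pos + 1) = ys := by
  have h2 : arr.drop (pos + 1) = (arr.drop pos).drop 1 := by
    rw [List.drop_drop, Nat.add_comm]
  rw [h2, h]; rfl

-- the fold over the remaining indices equals the machine on the remaining suffix
theorem pvFold_eq_mach (minN : Int) (arr : List Int) :
    ∀ (xs : List Int) (pos : Nat) (ret : List (List Int)) (inR : Bool) (off bv : Int),
      arr.drop pos = xs → pos < arr.length →
      (let s := (List.range' pos (arr.length - 1 - pos)).foldl (pvStepA arr minN)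
          (ret, inR, off, bv)
       if s.2.1 then s.1 ++ [[s.2.2.1, s.2.2.2, arr.getD (arr.length - 1) 0]] else s.1)
      = ret ++ pvMach minN (if inR then some (off, bv) else none) pos xs := by
  intro xs
  induction xs with
  | nil => intro pos ret inR off bv hd hp
           exfalso
           have := congrArg List.length hd
           simp [List.length_drop] at this; omega
  | cons a t ih =>
    intro pos ret inR off bv hd hp
    have hlen : arr.length - pos = t.length + 1 := by
      have := congrArg List.length hd; simpa [List.length_drop] using this
    cases t with
    | nil =>
      -- xs = [a]: pos = arr.length - 1, no loop iterations remain
      simp only [List.length_nil] at hlen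
      have hpos : pos = arr.length - 1 := by omega
      have hrange : arr.length - 1 - pos = 0 := by omega
      have hga : arr[arr.length - 1]? = some a := by
        rw [← hpos]; exact getElem?_of_drop arr pos a [] hd
      have hfold : List.range' pos (arr.length - 1 - pos) = [] := by rw [hrange]; rfl
      rw [hfold]
      cases inR <;> simp [pvMach, List.getD_eq_getElem?_getD, hga]
    | cons b s =>
      -- xs = a :: b :: s
      simp only [List.length_cons] at hlen
      have hga : arr[pos]? = some a := getElem?_of_drop arr pos a (b :: s) hd
      have hd' : arr.drop (pos + 1) = b :: s := drop_succ_of_drop arr pos a (b :: s) hd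
      have hgb : arr[pos + 1]? = some b := getElem?_of_drop arr (pos + 1) b s hd'
      have hp' : pos + 1 < arr.length := by omega
      have hcount : arr.length - 1 - pos = (arr.length - 1 - (pos + 1)) + 1 := by omega
      rw [hcount, List.range'_succ, List.foldl_cons]
      by_cases hab : a + 1 = b
      · cases inR with
        | false =>
          have hstep : pvStepA arr minN (ret, false, off, bv) pos
              = (ret, true, (pos : Int), a) := by
            simp [pvStepA, List.getD_eq_getElem?_getD, hga, hgb, hab]
          rw [hstep, ih (pos + 1) ret true (pos : Int) a hd' hp']
          simp [pvMach, hab]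
        | true =>
          have hstep : pvStepA arr minN (ret, true, off, bv) pos
              = (ret, true, off, bv) := by
            simp [pvStepA, List.getD_eq_getElem?_getD, hga, hgb, hab]
          rw [hstep, ih (pos + 1) ret true off bv hd' hp']
          simp [pvMach, hab]
      · cases inR with
        | false =>
          have hstep : pvStepA arr minN (ret, false, off, bv) pos
              = (ret, false, off, bv) := by
            simp [pvStepA, List.getD_eq_getElem?_getD, hga, hgb, hab]
          rw [hstep, ih (pos + 1) ret false off bv hd' hp']
          simp [pvMach, hab]
        | true =>
          have hstep : pvStepA arr minN (ret, true, off, bv) pos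
              = ((if minN ≤ 1 + (pos : Int) - off then ret ++ [[off, bv, a]] else ret),
                 false, off, bv) := by
            simp [pvStepA, List.getD_eq_getElem?_getD, hga, hgb, hab]
          rw [hstep, ih (pos + 1) _ false off bv hd' hp']
          by_cases hmin : minN ≤ 1 + (pos : Int) - off <;>
            simp [pvMach, hab, hmin, List.append_assoc]

theorem pvRunLen_le_length (xs : List Int) : pvRunLen xs ≤ xs.length := by
  induction xs with
  | nil => simp [pvRunLen]
  | cons a t ih =>
    cases t with
    | nil => simp [pvRunLen]
    | cons b s =>
      simp only [pvRunLen, List.length_cons] at *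
      split <;> omega

theorem pvTrail_le_length (xs : List Int) : pvTrail xs ≤ xs.length := by
  induction xs with
  | nil => simp [pvTrail]
  | cons a t ih =>
    cases t with
    | nil => simp [pvTrail]
    | cons b s =>
      simp only [pvTrail, List.length_cons] at *
      split <;> omega

theorem pvRunLen_of_trail_full (xs : List Int) (h : pvTrail xs = xs.length) :
    pvRunLen xs = xs.length := by
  induction xs with
  | nil => simp [pvRunLen]
  | cons a t ih =>
    cases t with
    | nil => simp [pvRunLen]
    | cons b s =>
      simp only [pvTrail, List.length_cons] at h
      by_cases hc : a + 1 = b ∧ pvTrail (b :: s) = s.length + 1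
      · simp only [if_pos hc] at h
        have := ih (by simpa using hc.2)
        simp only [pvRunLen, if_pos hc.1, List.length_cons]
        simpa using this
      · simp only [if_neg hc] at h
        have := pvTrail_le_length (b :: s)
        simp at this; omega

theorem pvTrail_step (a b : Int) (t : List Int)
    (h : a + 1 = b → pvRunLen (b :: t) < t.length + 1) :
    pvTrail (a :: b :: t) = pvTrail (b :: t) := by
  simp only [pvTrail]
  split
  · next hc =>
    exfalso
    have := pvRunLen_of_trail_full (b :: t) (by simpa using hc.2)
    have hlt := h hc.1
    simp at this; omega
  · rfl

theorem pvTrail_drop_runLen (xs : List Int) (h : pvRunLen xs < xs.length) :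
    pvTrail (xs.drop (pvRunLen xs)) = pvTrail xs := by
  induction xs with
  | nil => simp [pvRunLen] at h
  | cons a t ih =>
    cases t with
    | nil => simp [pvRunLen] at h
    | cons b s =>
      by_cases hab : a + 1 = b
      · have hr : pvRunLen (a :: b :: s) = pvRunLen (b :: s) + 1 := by
          simp [pvRunLen, hab]
        have h' : pvRunLen (b :: s) < (b :: s).length := by
          simp only [List.length_cons] at *; omega
        have htr := pvTrail_step a b s (fun _ => by simpa using h')
        rw [hr, htr, ← ih h']
        rfl
      · have hr : pvRunLen (a :: b :: s) = 1 := by simp [pvRunLen, hab]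
        rw [hr, pvTrail_step a b s (fun hc => absurd hc hab)]
        rfl

-- the machine in in-range state: it finishes the current run
theorem pvMach_some (minN : Int) :
    ∀ (xs : List Int) (off bv : Int) (pos : Nat), xs ≠ [] →
      pvMach minN (some (off, bv)) pos xs =
        (if pvRunLen xs = xs.length then [[off, bv, xs.getD (pvRunLen xs - 1) 0]]
         else (if minN ≤ 1 + ((pos : Int) + pvRunLen xs - 1) - off then
                 [[off, bv, xs.getD (pvRunLen xs - 1) 0]] else [])
           ++ pvMach minN none (pos + pvRunLen xs) (xs.drop (pvRunLen xs))) := by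
  intro xs
  induction xs with
  | nil => intro off bv pos h; exact absurd rfl h
  | cons a t ih =>
    intro off bv pos _
    cases t with
    | nil => simp [pvMach, pvRunLen]
    | cons b s =>
      by_cases hab : a + 1 = b
      · have hr : pvRunLen (a :: b :: s) = pvRunLen (b :: s) + 1 := by
          simp [pvRunLen, hab]
        have hm : pvMach minN (some (off, bv)) pos (a :: b :: s)
            = pvMach minN (some (off, bv)) (pos + 1) (b :: s) := by
          simp [pvMach, hab]
        rw [hm, ih off bv (pos + 1) (by simp)]
        have h1 := pvRunLen_pos b s
        have hgd : (a :: b :: s).getD (pvRunLen (a :: b :: s) - 1) 0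
            = (b :: s).getD (pvRunLen (b :: s) - 1) 0 := by
          rw [hr]
          have : pvRunLen (b :: s) + 1 - 1 = (pvRunLen (b :: s) - 1) + 1 := by omega
          rw [this]; rfl
        have hdrop : (a :: b :: s).drop (pvRunLen (a :: b :: s))
            = (b :: s).drop (pvRunLen (b :: s)) := by
          rw [hr]; rfl
        have hlen : (pvRunLen (a :: b :: s) = (a :: b :: s).length)
            ↔ (pvRunLen (b :: s) = (b :: s).length) := by
          simp only [hr, List.length_cons]; omega
        by_cases hfull : pvRunLen (b :: s) = (b :: s).length
        · rw [if_pos hfull, if_pos (hlen.mpr hfull), hgd]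
        · rw [if_neg hfull, if_neg (fun hh => hfull (hlen.mp hh)), hgd, hdrop]
          have hsz : (1 + (((pos : Nat) + 1 : Nat) : Int) + (pvRunLen (b :: s) : Int) - 1 - off)
              = 1 + ((pos : Int) + (pvRunLen (a :: b :: s) : Int) - 1) - off := by
            push_cast [hr]; ring
          have hpos : pos + 1 + pvRunLen (b :: s) = pos + pvRunLen (a :: b :: s) := by
            rw [hr]; omega
          rw [hpos]
          congr 1
          have : (1 + (((pos + 1 : Nat) : Int) + (pvRunLen (b :: s) : Int) - 1) - off)
              = (1 + ((pos : Int) + (pvRunLen (a :: b :: s) : Int) - 1) - off) := by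
            push_cast [hr]; ring
          rw [this]
      · have hr : pvRunLen (a :: b :: s) = 1 := by simp [pvRunLen, hab]
        have hm : pvMach minN (some (off, bv)) pos (a :: b :: s)
            = (if minN ≤ 1 + (pos : Int) - off then [[off, bv, a]] else []) ++
                pvMach minN none (pos + 1) (b :: s) := by
          simp [pvMach, hab]
        rw [hm, hr]
        have hne : ¬ (1 = (a :: b :: s).length) := by simp
        rw [if_neg hne]
        simp


theorem pvTrail_of_runLen_full (xs : List Int) (h : pvRunLen xs = xs.length) :
    pvTrail xs = xs.length := by
  induction xs with
  | nil => simp [pvTrail]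
  | cons c u ihy =>
    cases u with
    | nil => simp [pvTrail]
    | cons d v =>
      by_cases hcd : c + 1 = d
      · simp only [pvRunLen, if_pos hcd, List.length_cons] at h
        have hfull : pvRunLen (d :: v) = (d :: v).length := by
          simp only [List.length_cons]; omega
        have htv := ihy hfull
        simp only [pvTrail, List.length_cons] at *
        rw [if_pos ⟨hcd, by omega⟩]; omega
      · simp only [pvRunLen, if_neg hcd, List.length_cons] at h
        omega

-- the machine out of range equals B's run recursion, given a good trailing run
theorem pvMach_none_eq_alt_aux (minN : Int) :
    ∀ (n : Nat) (xs : List Int), xs.length ≤ n → ∀ (pos : Nat),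
      (pvTrail xs < 2 ∨ minN ≤ (pvTrail xs : Int)) →
      pvMach minN none pos xs = pvAltGo minN (pos : Int) xs := by
  intro n
  induction n with
  | zero =>
    intro xs hn pos _
    have hx : xs = [] := List.length_eq_zero_iff.mp (by omega)
    subst hx; simp [pvMach, pvAltGo]
  | succ n ih =>
    intro xs hn pos hgood
    cases xs with
    | nil => simp [pvMach, pvAltGo]
    | cons a t =>
      cases t with
      | nil => simp [pvMach, pvAltGo, pvRunLen]
      | cons b s =>
        by_cases hab : a + 1 = b
        · have hr : pvRunLen (a :: b :: s) = pvRunLen (b :: s) + 1 := by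
            simp [pvRunLen, hab]
          have hm : pvMach minN none pos (a :: b :: s)
              = pvMach minN (some ((pos : Int), a)) (pos + 1) (b :: s) := by
            simp [pvMach, hab]
          rw [hm, pvMach_some minN (b :: s) (pos : Int) a (pos + 1) (by simp)]
          have h1 := pvRunLen_pos b s
          have hk2 : 2 ≤ pvRunLen (a :: b :: s) := by omega
          have hgd : (b :: s).getD (pvRunLen (b :: s) - 1) 0
              = (a :: b :: s).getD (pvRunLen (a :: b :: s) - 1) 0 := by
            rw [hr]
            have heq : pvRunLen (b :: s) + 1 - 1 = (pvRunLen (b :: s) - 1) + 1 := by omega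
            rw [heq]; rfl
          by_cases hfull : pvRunLen (b :: s) = (b :: s).length
          · -- the whole list is one run: A emits unconditionally, B checks minN;
            -- the trailing run is then the whole list, and ¬D_ supplies minN ≤ its length
            rw [if_pos hfull]
            have hfull' : pvRunLen (a :: b :: s) = (a :: b :: s).length := by
              simp only [hr, List.length_cons] at *; omega
            have htrail : pvTrail (a :: b :: s) = (a :: b :: s).length :=
              pvTrail_of_runLen_full _ hfull'
            have hminle : minN ≤ (pvRunLen (a :: b :: s) : Int) := by
              rcases hgood with h | h
              · rw [htrail] at h; simp at h
              · rw [htrail] at h; rw [hfull']; exact h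
            conv_rhs => rw [pvAltGo]
            rw [if_pos ⟨hk2, hminle⟩]
            have hdropnil : (a :: b :: s).drop (pvRunLen (a :: b :: s)) = [] := by
              rw [hfull']; simp
            rw [hdropnil, hgd]
            simp [pvAltGo]
          · rw [if_neg hfull]
            have hlt : pvRunLen (a :: b :: s) < (a :: b :: s).length := by
              have := pvRunLen_le_length (b :: s)
              simp only [hr, List.length_cons] at *; omega
            have hsz : (minN ≤ 1 + (((pos + 1 : Nat) : Int) + (pvRunLen (b :: s) : Int) - 1) - (pos : Int))
                ↔ (minN ≤ (pvRunLen (a :: b :: s) : Int)) := by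
              rw [hr]; push_cast; omega
            have hdrop : (b :: s).drop (pvRunLen (b :: s))
                = (a :: b :: s).drop (pvRunLen (a :: b :: s)) := by
              rw [hr]; rfl
            have hgood' : pvTrail ((a :: b :: s).drop (pvRunLen (a :: b :: s))) < 2 ∨
                minN ≤ (pvTrail ((a :: b :: s).drop (pvRunLen (a :: b :: s))) : Int) := by
              rw [pvTrail_drop_runLen _ hlt]; exact hgood
            have hlen' : ((a :: b :: s).drop (pvRunLen (a :: b :: s))).length ≤ n := by
              rw [List.length_drop]
              simp only [List.length_cons] at *
              omega
            have hrec := ih _ hlen' (pos + pvRunLen (a :: b :: s)) hgood'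
            have hposeq : pos + 1 + pvRunLen (b :: s) = pos + pvRunLen (a :: b :: s) := by
              rw [hr]; omega
            rw [hdrop, hposeq, hrec]
            conv_rhs => rw [pvAltGo]
            congr 1
            · split_ifs with h1 h2 h2
              · rw [hgd]
              · exfalso; apply h2
                refine ⟨hk2, ?_⟩
                push_cast [hr] at h1 ⊢; omega
              · exfalso; apply h1
                have := h2.2
                push_cast [hr] at this ⊢; omega
              · rfl
        · have hr : pvRunLen (a :: b :: s) = 1 := by simp [pvRunLen, hab]
          have hm : pvMach minN none pos (a :: b :: s)
              = pvMach minN none (pos + 1) (b :: s) := by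
            simp [pvMach, hab]
          have hgood' : pvTrail (b :: s) < 2 ∨ minN ≤ (pvTrail (b :: s) : Int) := by
            rwa [pvTrail_step a b s (fun hc => absurd hc hab)] at hgood
          have hlen2 : (b :: s).length ≤ n := by
            simp only [List.length_cons] at hn ⊢; omega
          have hrec := ih (b :: s) hlen2 (pos + 1) hgood'
          have hc : ((pos + 1 : Nat) : Int) = (pos : Int) + 1 := by push_cast; ring
          rw [hm, hrec]
          simp [pvAltGo, hr, hc]


-- the zip-based run condition of D_ vs List.IsChain
theorem pvRun_iff_chain : ∀ l : List Int,
    (∀ p ∈ l.zip l.tail, p.1 + 1 = p.2) ↔ List.IsChain (fun p q : Int => p + 1 = q) l := by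
  intro l
  induction l with
  | nil => simp
  | cons a t ih =>
    cases t with
    | nil => simp
    | cons b t' =>
      rw [List.isChain_cons_cons, ← ih]
      simp only [List.tail_cons, List.zip_cons_cons, List.mem_cons]
      constructor
      · intro h
        exact ⟨h (a, b) (Or.inl rfl), fun p hp => h p (Or.inr hp)⟩
      · rintro ⟨hab, h⟩ p hp
        rcases hp with rfl | hp
        · exact hab
        · exact h p hp

-- pvTrail (proof-side) vs the closed-form trailing-slice condition of D_
theorem pvTrail_ge_iff (xs : List Int) : ∀ k : Nat, 1 ≤ k →
    (k ≤ pvTrail xs ↔ (k ≤ xs.length ∧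
      List.IsChain (fun p q : Int => p + 1 = q) (xs.drop (xs.length - k)))) := by
  induction xs with
  | nil =>
    intro k hk
    simp [pvTrail]

  | cons a t ih =>
    cases t with
    | nil =>
      intro k hk
      constructor
      · intro hkt
        have hk1 : k = 1 := by simp [pvTrail] at hkt; omega
        subst hk1; exact ⟨by simp, by simp⟩
      · rintro ⟨hkl, _⟩
        have hk1 : k = 1 := by simp at hkl; omega
        simp [pvTrail, hk1]
    | cons b t' =>
      intro k hk
      have hT := pvTrail_le_length (b :: t')
      have hT2 := pvTrail_le_length (a :: b :: t')
      by_cases hksmall : k ≤ (b :: t').length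
      · -- the slice lies inside b :: t'
        have hsub : (a :: b :: t').length - k = ((b :: t').length - k) + 1 := by
          simp only [List.length_cons] at *; omega
        rw [hsub, List.drop_succ_cons]
        have hiff := ih k hk
        have hlhs : (k ≤ pvTrail (a :: b :: t')) ↔ (k ≤ pvTrail (b :: t')) := by
          simp only [pvTrail]
          split
          · next hcond =>
            have h2 := hcond.2
            simp only [List.length_cons] at *
            omega
          · exact Iff.rfl
        rw [hlhs, hiff]
        simp only [List.length_cons] at *
        constructor
        · rintro ⟨h1, h2⟩; exact ⟨by omega, h2⟩
        · rintro ⟨h1, h2⟩; exact ⟨by omega, h2⟩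
      · by_cases hkeq : k = (a :: b :: t').length
        · -- the slice is the whole list
          subst hkeq
          rw [Nat.sub_self, List.drop_zero]
          have hchain : List.IsChain (fun p q : Int => p + 1 = q) (a :: b :: t')
              ↔ (a + 1 = b ∧ List.IsChain (fun p q : Int => p + 1 = q) (b :: t')) :=
            List.isChain_cons_cons
          have hiff := ih (b :: t').length (by simp)
          rw [Nat.sub_self, List.drop_zero] at hiff
          simp only [le_refl, true_and] at hiff
          constructor
          · intro hkt
            have hcond : a + 1 = b ∧ pvTrail (b :: t') = t'.length + 1 := by
              by_contra hc
              simp only [pvTrail, if_neg hc] at hkt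
              simp only [List.length_cons] at *
              omega
            refine ⟨le_refl _, hchain.mpr ⟨hcond.1, hiff.mp ?_⟩⟩
            simp only [List.length_cons]; omega
          · rintro ⟨-, hch⟩
            obtain ⟨hab2, hch2⟩ := hchain.mp hch
            have htb := hiff.mpr hch2
            simp only [pvTrail, List.length_cons] at *
            rw [if_pos ⟨hab2, by omega⟩]
            omega
        · -- k exceeds the length: both sides are false
          have hbig : (a :: b :: t').length < k := by
            simp only [List.length_cons] at *; omega
          constructor
          · intro hkt; exfalso; omega
          · rintro ⟨h1, _⟩; exfalso; omega

theorem pvMach_none_eq_alt (minN : Int) (xs : List Int) (pos : Nat)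
    (hgood : pvTrail xs < 2 ∨ minN ≤ (pvTrail xs : Int)) :
    pvMach minN none pos xs = pvAltGo minN (pos : Int) xs :=
  pvMach_none_eq_alt_aux minN xs.length xs le_rfl pos hgood

theorem pv_main (array : List Int) (isSorted : Bool)
    (hgood : pvTrail array < 2 ∨ (if isSorted then (1:Int) else 10) ≤ (pvTrail array : Int)) :
    findContigousRanges array isSorted = findContigousRanges_alt array isSorted := by
  by_cases harr : array = []
  · subst harr
    cases isSorted <;> simp [findContigousRanges, findContigousRanges_alt, pvAltGo]
  · have hp : 0 < array.length := List.length_pos_iff.mpr harr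
    have hmain := pvFold_eq_mach (if isSorted then 1 else 10) array array 0 [] false (-1) (-1)
      rfl hp
    have hrest : ([] : List (List Int)) ++
        pvMach (if isSorted then 1 else 10) none 0 array
        = findContigousRanges_alt array isSorted := by
      rw [List.nil_append, pvMach_none_eq_alt _ _ _ hgood]
      unfold findContigousRanges_alt
      norm_num
    unfold findContigousRanges
    rw [List.range_eq_range']
    exact hmain.trans hrest

-- ===== VERDICT (by name: the statement is the Claim_ definition above) =====
theorem findContigousRanges_spec : Claim_unchanged_findContigousRanges := by
  unfold Claim_unchanged_findContigousRanges
  intro array isSorted _ hD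
  apply pv_main
  unfold D_findContigousRanges at hD
  have hge2 := pvTrail_ge_iff array 2 (by omega)
  have hge10 := pvTrail_ge_iff array 10 (by omega)
  rw [← pvRun_iff_chain] at hge2 hge10
  cases isSorted with
  | true => simp only [reduceIte]; omega
  | false =>
    norm_num
    by_cases h2 : 2 ≤ pvTrail array
    · right
      have h10 : 10 ≤ pvTrail array := by
        by_contra h10n
        exact hD ⟨rfl, hge2.mp h2, fun hbig => h10n (hge10.mpr hbig)⟩
      omega
    · left; omega

theorem findContigousRanges_changed : Claim_changed_findContigousRanges := by
  unfold Claim_changed_findContigousRanges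
  refine ⟨by decide, by decide, by decide, ?_, by decide⟩
  show findContigousRanges_alt [5, 6] false = []
  norm_num [findContigousRanges_alt, pvAltGo, pvRunLen]

-- inside D_ the machine appends the trailing run unconditionally, B never does
theorem pvMach_none_bad_aux (minN : Int) :
    ∀ (n : Nat) (xs : List Int), xs.length ≤ n → ∀ (pos : Nat),
      2 ≤ pvTrail xs → (pvTrail xs : Int) < minN →
      ∃ r, pvMach minN none pos xs = pvAltGo minN (pos : Int) xs ++ [r] := by
  intro n
  induction n with
  | zero =>
    intro xs hn pos h2 _
    exfalso
    have hx : xs = [] := List.length_eq_zero_iff.mp (by omega)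
    subst hx; simp [pvTrail] at h2
  | succ n ih =>
    intro xs hn pos h2 hlt
    cases xs with
    | nil => simp [pvTrail] at h2
    | cons a t =>
      cases t with
      | nil => simp [pvTrail] at h2
      | cons b s =>
        by_cases hab : a + 1 = b
        · have hr : pvRunLen (a :: b :: s) = pvRunLen (b :: s) + 1 := by
            simp [pvRunLen, hab]
          have hm : pvMach minN none pos (a :: b :: s)
              = pvMach minN (some ((pos : Int), a)) (pos + 1) (b :: s) := by
            simp [pvMach, hab]
          rw [hm, pvMach_some minN (b :: s) (pos : Int) a (pos + 1) (by simp)]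
          have h1 := pvRunLen_pos b s
          have hk2 : 2 ≤ pvRunLen (a :: b :: s) := by omega
          have hgd : (b :: s).getD (pvRunLen (b :: s) - 1) 0
              = (a :: b :: s).getD (pvRunLen (a :: b :: s) - 1) 0 := by
            rw [hr]
            have heq : pvRunLen (b :: s) + 1 - 1 = (pvRunLen (b :: s) - 1) + 1 := by omega
            rw [heq]; rfl
          by_cases hfull : pvRunLen (b :: s) = (b :: s).length
          · rw [if_pos hfull]
            have hfull' : pvRunLen (a :: b :: s) = (a :: b :: s).length := by
              simp only [hr, List.length_cons] at *; omega
            have htrail : pvTrail (a :: b :: s) = (a :: b :: s).length :=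
              pvTrail_of_runLen_full _ hfull'
            refine ⟨[(pos : Int), a, (b :: s).getD (pvRunLen (b :: s) - 1) 0], ?_⟩
            conv_rhs => rw [pvAltGo]
            rw [if_neg ?hc]
            case hc =>
              rintro ⟨-, hmle⟩
              rw [htrail] at hlt
              rw [hfull'] at hmle
              omega
            have hdropnil : (a :: b :: s).drop (pvRunLen (a :: b :: s)) = [] := by
              rw [hfull']; simp
            rw [hdropnil]
            simp [pvAltGo]
          · rw [if_neg hfull]
            have hltlen : pvRunLen (a :: b :: s) < (a :: b :: s).length := by
              have := pvRunLen_le_length (b :: s)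
              simp only [hr, List.length_cons] at *; omega
            have hdrop : (b :: s).drop (pvRunLen (b :: s))
                = (a :: b :: s).drop (pvRunLen (a :: b :: s)) := by
              rw [hr]; rfl
            have htr := pvTrail_drop_runLen (a :: b :: s) hltlen
            have hlen' : ((a :: b :: s).drop (pvRunLen (a :: b :: s))).length ≤ n := by
              rw [List.length_drop]
              simp only [List.length_cons] at *
              omega
            obtain ⟨r, hrec⟩ := ih _ hlen' (pos + pvRunLen (a :: b :: s))
              (by rw [htr]; exact h2) (by rw [htr]; exact hlt)
            have hposeq : pos + 1 + pvRunLen (b :: s) = pos + pvRunLen (a :: b :: s) := by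
              rw [hr]; omega
            refine ⟨r, ?_⟩
            rw [hdrop, hposeq, hrec]
            conv_rhs => rw [pvAltGo]
            conv_rhs => rw [List.append_assoc]
            congr 1
            · split_ifs with h1' h2' h2'
              · rw [hgd]
              · exfalso; apply h2'
                refine ⟨hk2, ?_⟩
                push_cast [hr] at h1' ⊢; omega
              · exfalso; apply h1'
                have := h2'.2
                push_cast [hr] at this ⊢; omega
              · rfl
        · have hr : pvRunLen (a :: b :: s) = 1 := by simp [pvRunLen, hab]
          have hm : pvMach minN none pos (a :: b :: s)
              = pvMach minN none (pos + 1) (b :: s) := by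
            simp [pvMach, hab]
          have htr : pvTrail (a :: b :: s) = pvTrail (b :: s) :=
            pvTrail_step a b s (fun hc => absurd hc hab)
          have hlen2 : (b :: s).length ≤ n := by
            simp only [List.length_cons] at hn ⊢; omega
          obtain ⟨r, hrec⟩ := ih (b :: s) hlen2 (pos + 1)
            (by rw [← htr]; exact h2) (by rw [← htr]; exact hlt)
          have hc : ((pos + 1 : Nat) : Int) = (pos : Int) + 1 := by push_cast; ring
          refine ⟨r, ?_⟩
          rw [hm, hrec]
          simp [pvAltGo, hr, hc]

theorem findContigousRanges_tight : Claim_exact_findContigousRanges := by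
  unfold Claim_exact_findContigousRanges
  intro array isSorted _ hD
  obtain ⟨hs, hD2, hD10⟩ := hD
  subst hs
  have hge2 := pvTrail_ge_iff array 2 (by omega)
  have hge10 := pvTrail_ge_iff array 10 (by omega)
  rw [← pvRun_iff_chain] at hge2 hge10
  have h2 : 2 ≤ pvTrail array := hge2.mpr hD2
  have h10 : ¬ 10 ≤ pvTrail array := fun h => hD10 (hge10.mp h)
  have harr : array ≠ [] := by intro h; subst h; simp [pvTrail] at h2
  have hp : 0 < array.length := List.length_pos_iff.mpr harr
  have hmain := pvFold_eq_mach 10 array array 0 [] false (-1) (-1) rfl hp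
  obtain ⟨r, hbad⟩ := pvMach_none_bad_aux 10 array.length array le_rfl 0 h2 (by omega)
  intro hEq
  have hA : findContigousRanges array false = [] ++ pvMach 10 none 0 array := by
    unfold findContigousRanges
    rw [List.range_eq_range']
    exact hmain
  rw [hA, List.nil_append, hbad] at hEq
  have hlen := congrArg List.length hEq
  rw [List.length_append] at hlen
  have halt : findContigousRanges_alt array false = pvAltGo 10 ((0 : Nat) : Int) array := rfl
  rw [halt] at hlen
  simp at hlen
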